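-- pv_equiv track=rewrite | github.com/kkr010128/codebert | problem052/problem052_37.py | nabeatsu
-- ===== SOURCE A (Python) =====
-- def nabeatsu(n):
--     if(n % 3 == 0):
--         return True
--     temp = n
--     while(temp > 0):
--         if(temp % 10 == 3):
--             return True
--         temp = temp // 10
--     return False
-- ===== SOURCE B (Python) =====
-- def nabeatsu(n):
--     return n % 3 == 0 or (n > 0 and '3' in str(n))
-- ===== Notes on version B (the rewrite author's own statement) =====
-- stated objective: idiomatic
-- what changed: Replaced the manual modulus/quotient digit-extraction loop with a one-line boolean expression testing '3' in str(n) (guarded by n > 0 so non-positive inputs match A's skipped loop).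
import Mathlib
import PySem

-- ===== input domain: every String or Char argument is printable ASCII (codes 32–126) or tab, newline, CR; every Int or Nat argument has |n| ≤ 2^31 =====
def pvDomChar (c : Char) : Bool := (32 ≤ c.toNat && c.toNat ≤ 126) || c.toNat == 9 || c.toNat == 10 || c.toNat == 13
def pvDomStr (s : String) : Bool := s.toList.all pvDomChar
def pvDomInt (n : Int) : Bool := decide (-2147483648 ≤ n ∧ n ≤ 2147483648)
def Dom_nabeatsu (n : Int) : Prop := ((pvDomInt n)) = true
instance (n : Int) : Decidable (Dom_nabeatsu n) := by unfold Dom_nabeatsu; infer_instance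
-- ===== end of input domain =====

-- B replaces A's modulus/quotient digit-extraction loop with one boolean expression testing '3' in str(n) (idiomatic).

-- ===== PORT A =====
-- the 'while temp > 0' loop of A, step for step
def nabeatsuLoop (temp : Int) : Bool :=
  if _h : temp > 0 then
    if PySem.Int.mod temp 10 == 3 then true
    else nabeatsuLoop (PySem.Int.floordiv temp 10)
  else false
termination_by temp.toNat
decreasing_by
  have : PySem.Int.floordiv temp 10 = temp / 10 :=
    PySem.Int.floordiv_eq_ediv_of_pos (by omega)
  rw [this]; omega

def nabeatsu (n : Int) : Bool :=
  if PySem.Int.mod n 3 == 0 then true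
  else nabeatsuLoop n

-- ===== PORT B =====
def nabeatsu_alt (n : Int) : Bool :=
  PySem.Int.mod n 3 == 0 || (decide (n > 0) && (PySem.Int.toStr n).toList.contains '3')

-- ===== PRECONDITION & SPEC =====
def Spec_nabeatsu (n : Int) (out : Bool) : Prop := out = nabeatsu_alt n
instance (n : Int) (out : Bool) : Decidable (Spec_nabeatsu n out) := by unfold Spec_nabeatsu; infer_instance

-- ===== CLAIM (what is proved, stated in full; the proofs are below) =====
def Claim_equal_nabeatsu : Prop := ∀ (n : Int), Dom_nabeatsu n → Spec_nabeatsu n (nabeatsu n)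

-- ===== LEMMAS AND PROOFS =====

-- A's digit loop, restated on Nat (proof helper)
def natLoop (n : Nat) : Bool :=
  if h : n = 0 then false
  else if n % 10 == 3 then true
  else natLoop (n / 10)
termination_by n
decreasing_by exact Nat.div_lt_self (Nat.pos_of_ne_zero h) (by norm_num)

lemma digitChar_eq_three (d : Nat) (hd : d < 10) : (Nat.digitChar d = '3') ↔ d = 3 := by
  interval_cases d <;> simp [Nat.digitChar]

lemma natLoop_zero : natLoop 0 = false := by rw [natLoop]; simp

lemma natLoop_pos (n : Nat) (h0 : n ≠ 0) :
    natLoop n = (n % 10 == 3 || natLoop (n / 10)) := by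
  rw [natLoop]
  by_cases h3 : n % 10 = 3 <;> simp [h0, h3]

lemma mem3_toDigitsCore (f : Nat) :
    ∀ (n : Nat) (l : List Char), n < f →
      ('3' ∈ Nat.toDigitsCore 10 f n l ↔ natLoop n = true ∨ '3' ∈ l) := by
  induction f with
  | zero => intro n l h; omega
  | succ f ih =>
    intro n l h
    rw [Nat.toDigitsCore]
    by_cases h0 : n = 0
    · subst h0
      simp [natLoop_zero, Nat.digitChar]
    · rw [natLoop_pos n h0]
      have hmod : n % 10 < 10 := Nat.mod_lt _ (by norm_num)
      have hch : ('3' = Nat.digitChar (n % 10)) ↔ (n % 10 = 3) := by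
        rw [eq_comm, digitChar_eq_three _ hmod]
      by_cases hdiv : n / 10 = 0
      · have hloop : natLoop (n / 10) = false := hdiv ▸ natLoop_zero
        rw [if_pos hdiv, hloop, Bool.or_false]
        simp only [List.mem_cons, beq_iff_eq, hch]
      · have hlt : n / 10 < f := by
          have := Nat.div_lt_self (Nat.pos_of_ne_zero h0) (show 1 < 10 by norm_num)
          omega
        rw [if_neg hdiv, ih (n / 10) _ hlt]
        simp only [List.mem_cons, Bool.or_eq_true, beq_iff_eq, hch]
        tauto

lemma mem3_toDigits (n : Nat) : ('3' ∈ Nat.toDigits 10 n ↔ natLoop n = true) := by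
  have := mem3_toDigitsCore (n + 1) n [] (by omega)
  simpa [Nat.toDigits] using this

lemma nabeatsuLoop_eq_natLoop (n : Int) : nabeatsuLoop n = natLoop n.toNat := by
  by_cases h : n > 0
  · rw [nabeatsuLoop]
    have h0 : n.toNat ≠ 0 := by omega
    rw [natLoop_pos _ h0]
    have hm : PySem.Int.mod n 10 = n % 10 := PySem.Int.mod_eq_emod_of_pos (by omega)
    have hd : PySem.Int.floordiv n 10 = n / 10 := PySem.Int.floordiv_eq_ediv_of_pos (by omega)
    have hmn : (n % 10 == (3 : Int)) = (n.toNat % 10 == 3) := by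
      rw [Bool.eq_iff_iff]; simp only [beq_iff_eq]; omega
    have hdn : (n / 10).toNat = n.toNat / 10 := by omega
    rw [dif_pos h, hm, hd, hmn, nabeatsuLoop_eq_natLoop (n / 10), hdn]
    by_cases h3 : (n.toNat % 10 == 3) = true <;> simp [h3]
  · rw [nabeatsuLoop]
    have h0 : n.toNat = 0 := by omega
    simp [h, h0, natLoop_zero]
termination_by n.toNat
decreasing_by omega

lemma main_eq (n : Int) : nabeatsu n = nabeatsu_alt n := by
  unfold nabeatsu nabeatsu_alt
  by_cases h3 : (PySem.Int.mod n 3 == 0) = true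
  · rw [if_pos h3, h3, Bool.true_or]
  · rw [if_neg h3, Bool.eq_false_iff.mpr h3, Bool.false_or]
    rw [nabeatsuLoop_eq_natLoop]
    by_cases h : n > 0
    · have hc : (PySem.Int.toStr n).toList = Nat.toDigits 10 n.toNat := by
        rw [PySem.Int.toList_toStr]
        simp [PySem.Int.toChars, show ¬ n < 0 by omega]
      rw [hc]
      simp only [h, decide_true, Bool.true_and, List.contains_eq_mem]
      rw [Bool.eq_iff_iff]
      simp [mem3_toDigits]
    · have h0 : n.toNat = 0 := by omega
      simp [h, h0, natLoop_zero]

-- ===== VERDICT (by name: the statement is the Claim_ definition above) =====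
theorem nabeatsu_spec : Claim_equal_nabeatsu := by
  intro n _
  exact main_eq n
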